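-- pv_equiv track=rewrite | github.com/dleemiller/CnakeCharmer | data/grpo_problems/factorial_combinations.py | factorial_combinations
-- ===== SOURCE A (Python) =====
-- def factorial_combinations(n):
--     """Compute n!, and count combinations C(n, k) for all k.
--
--     Returns (factorial_n, sum_of_combinations, max_combination).
--     """
--     # Compute factorial
--     fact = 1
--     for i in range(1, n + 1):
--         fact *= i
--
--     # Compute all C(n, k) using Pascal's triangle row
--     row = [1] * (n + 1)
--     for i in range(1, n + 1):
--         new_row = [1] * (n + 1)
--         for j in range(1, i):
--             new_row[j] = row[j - 1] + row[j]
--         row = new_row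
--
--     sum_comb = sum(row[: n + 1])
--     max_comb = max(row[: n + 1])
--     return (fact, sum_comb, max_comb)
-- ===== SOURCE B (Python) =====
-- def factorial_combinations(n):
--     """Compute n!, and count combinations C(n, k) for all k.
--
--     Returns (factorial_n, sum_of_combinations, max_combination).
--     """
--     # factorial by a single product loop
--     fact = 1
--     for i in range(2, n + 1):
--         fact *= i
--     # sum of C(n, k) over all k is 2^n; the largest is the central C(n, n // 2),
--     # computed by the exact multiplicative formula C(n, i) = C(n, i-1) * (n-i+1) // i
--     m = n // 2
--     c = 1
--     for i in range(1, m + 1):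
--         c = c * (n - i + 1) // i
--     return (fact, 2 ** n, c)
-- ===== Notes on version B (the rewrite author's own statement) =====
-- stated objective: faster
-- what changed: Replaces the O(n^2) Pascal's-triangle row construction with closed forms: the sum of C(n,k) is 2**n and the maximum is the central binomial C(n, n//2) computed by the exact multiplicative formula, leaving only O(n) multiplications.
-- outside the precondition, e.g. on factorial_combinations(-1): A raises ValueError, B returns (1, 0.5, 1)
import Mathlib
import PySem

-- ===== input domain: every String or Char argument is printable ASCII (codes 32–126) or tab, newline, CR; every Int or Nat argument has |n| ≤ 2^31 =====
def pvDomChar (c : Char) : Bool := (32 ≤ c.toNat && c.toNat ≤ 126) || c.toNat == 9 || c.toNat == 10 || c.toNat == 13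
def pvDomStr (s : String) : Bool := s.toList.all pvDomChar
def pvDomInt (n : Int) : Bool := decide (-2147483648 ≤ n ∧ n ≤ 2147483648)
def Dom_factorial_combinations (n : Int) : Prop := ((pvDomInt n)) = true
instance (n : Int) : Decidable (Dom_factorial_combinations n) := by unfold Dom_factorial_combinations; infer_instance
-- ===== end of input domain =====

-- B replaces A's quadratic Pascal-triangle row construction by closed forms: the row's sum is
-- 2^n and its maximum is the central binomial C(n, n//2), built by the exact multiplicative formula.

-- ===== PORT A =====
def factorial_combinations (n : Int) : List Int :=
  let fact := (PySem.List.pyRange 1 (n + 1) 1).foldl (fun acc i => acc * i) 1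
  let row := (PySem.List.pyRange 1 (n + 1) 1).foldl
    (fun row i =>
      (PySem.List.pyRange 1 i 1).foldl
        (fun nr j => PySem.List.pySetD nr j
          (PySem.List.pyGetD row (j - 1) 0 + PySem.List.pyGetD row j 0))
        (PySem.List.pyRepeat [1] (n + 1)))
    (PySem.List.pyRepeat [1] (n + 1))
  let sl := PySem.List.slice row none (some (n + 1))
  -- max() raises on an empty slice; Pre_ (0 ≤ n) keeps sl nonempty, so the .getD 0 never fires
  [fact, sl.sum, (PySem.List.max? sl (fun x => x)).getD 0]

-- ===== PORT B =====
def factorial_combinations_alt (n : Int) : List Int :=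
  let fact := (PySem.List.pyRange 2 (n + 1) 1).foldl (fun acc i => acc * i) 1
  let m := PySem.Int.floordiv n 2
  let c := (PySem.List.pyRange 1 (m + 1) 1).foldl
    (fun c i => PySem.Int.floordiv (c * (n - i + 1)) i) 1
  -- 2 ** n: exact for 0 ≤ n (guaranteed by Pre_); Python would yield a float for n < 0
  [fact, 2 ^ n.toNat, c]

-- ===== PRECONDITION & SPEC =====
-- Pre_ excludes n < 0, where the Python A raises ValueError (max() of the then-empty row slice).
def Pre_factorial_combinations (n : Int) : Prop := 0 ≤ n
instance (n : Int) : Decidable (Pre_factorial_combinations n) := by unfold Pre_factorial_combinations; infer_instance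
def pvWitness_factorial_combinations : Int := (5)

def Spec_factorial_combinations (n : Int) (out : List Int) : Prop := out = factorial_combinations_alt n
instance (n : Int) (out : List Int) : Decidable (Spec_factorial_combinations n out) := by unfold Spec_factorial_combinations; infer_instance

-- ===== CLAIM (what is proved, stated in full; the proofs are below) =====
def Claim_equal_factorial_combinations : Prop := ∀ (n : Int), Dom_factorial_combinations n → Pre_factorial_combinations n → Spec_factorial_combinations n (factorial_combinations n)

-- ===== LEMMAS AND PROOFS =====

-- the value of Pascal's row for C(i, ·) exactly as A's loop maintains it (cells beyond i still 1)
def pvRowFun (N i : Nat) : List Int :=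
  (List.range (N + 1)).map (fun j => if j ≤ i then ((Nat.choose i j : Nat) : Int) else 1)

theorem pv_fact1 (N : Nat) :
    (PySem.List.pyRange 1 ((N : Int) + 1) 1).foldl (fun acc i => acc * i) 1
      = ((Nat.factorial N : Nat) : Int) := by
  induction N with
  | zero => simp [PySem.List.pyRange_one_eq_nil, Nat.factorial]
  | succ k ih =>
    rw [show ((k + 1 : Nat) : Int) + 1 = ((k : Int) + 1) + 1 by push_cast; ring,
        PySem.List.pyRange_one_succ_right (by omega), List.foldl_append, ih]
    simp [Nat.factorial_succ]
    ring

theorem pv_fact2 (N : Nat) :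
    (PySem.List.pyRange 2 ((N : Int) + 1) 1).foldl (fun acc i => acc * i) 1
      = ((Nat.factorial N : Nat) : Int) := by
  match N with
  | 0 => simp [PySem.List.pyRange_one_eq_nil, Nat.factorial]
  | (k+1) =>
    have h := pv_fact1 (k+1)
    rw [PySem.List.pyRange_one_cons (by omega)] at h
    simpa using h

theorem pv_set_map_range (L : Nat) (f : Nat → Int) (i : Nat) (v : Int) :
    ((List.range L).map f).set i v
      = (List.range L).map (fun j => if j = i then v else f j) := by
  apply List.ext_getElem (by simp)
  intro k h1 h2
  simp at h1
  simp [List.getElem_set]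
  by_cases hk : k = i <;> simp [hk]
  omega

theorem pv_map_range_congr (L : Nat) (f g : Nat → Int) (h : ∀ j, j < L → f j = g j) :
    (List.range L).map f = (List.range L).map g := by
  apply List.ext_getElem (by simp)
  intro k h1 h2
  simp at h1
  simp [h k h1]

-- the inner write loop of A turns the fresh all-ones row into a positional map
theorem pv_inner (g : Int → Int) (i L : Nat) (hL : i ≤ L) :
    (PySem.List.pyRange 1 (i : Int) 1).foldl
        (fun nr j => PySem.List.pySetD nr j (g j)) (List.replicate L 1)
      = (List.range L).map (fun j => if 1 ≤ j ∧ j < i then g j else 1) := by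
  induction i with
  | zero =>
    rw [PySem.List.pyRange_one_eq_nil (by omega)]
    simp [List.foldl]
  | succ k ih =>
    match k, ih with
    | 0, _ =>
      rw [PySem.List.pyRange_one_eq_nil (by omega)]
      simp [List.foldl]
      apply List.ext_getElem (by simp)
      intro k h1 h2
      simp
      intro h; omega
    | (m+1), ih =>
      rw [show ((m + 1 + 1 : Nat) : Int) = ((m+1 : Nat) : Int) + 1 by push_cast; ring,
          PySem.List.pyRange_one_succ_right (by omega), List.foldl_append,
          ih (by omega)]
      simp only [List.foldl]
      rw [PySem.List.pySetD_natCast, pv_set_map_range]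
      apply pv_map_range_congr
      intro j hj
      by_cases hji : j = m + 1
      · simp [hji]
      · simp [hji]
        have : (1 ≤ j ∧ j ≤ m) ↔ (1 ≤ j ∧ j ≤ m + 1) := by omega
        simp only [this]

theorem pv_rowFun_zero (N : Nat) : pvRowFun N 0 = List.replicate (N + 1) 1 := by
  apply List.ext_getElem (by simp [pvRowFun])
  intro k h1 h2
  simp [pvRowFun] at h1 ⊢
  intro h; simp [h]

-- A's outer loop maintains Pascal's row: after iteration i the row holds C(i, ·)
theorem pv_outer (N i : Nat) (hi : i ≤ N) :
    (PySem.List.pyRange 1 ((i : Int) + 1) 1).foldl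
      (fun row k =>
        (PySem.List.pyRange 1 k 1).foldl
          (fun nr j => PySem.List.pySetD nr j
            (PySem.List.pyGetD row (j - 1) 0 + PySem.List.pyGetD row j 0))
          (List.replicate (N + 1) 1))
      (List.replicate (N + 1) 1) = pvRowFun N i := by
  induction i with
  | zero =>
    rw [PySem.List.pyRange_one_eq_nil (by omega)]
    simp [List.foldl, pv_rowFun_zero]
  | succ k ih =>
    rw [show ((k + 1 : Nat) : Int) + 1 = ((k : Int) + 1) + 1 by push_cast; ring,
        PySem.List.pyRange_one_succ_right (by omega), List.foldl_append,
        ih (by omega)]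
    simp only [List.foldl]
    rw [show ((k : Int) + 1) = ((k + 1 : Nat) : Int) by push_cast; ring,
        pv_inner _ (k + 1) (N + 1) (by omega)]
    apply pv_map_range_congr
    intro j hj
    by_cases hj1 : 1 ≤ j ∧ j < k + 1
    · -- interior cell: Pascal's rule C(k+1, j) = C(k, j-1) + C(k, j)
      obtain ⟨hj1a, hj1b⟩ := hj1
      have e1 : ((j : Nat) : Int) - 1 = ((j - 1 : Nat) : Int) := by omega
      simp only [hj1a, hj1b, and_self, if_pos, e1, PySem.List.pyGetD_natCast]
      unfold pvRowFun
      rw [PySem.List.getD_map_range _ (N+1) (j-1) 0 (by omega),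
          PySem.List.getD_map_range _ (N+1) j 0 (by omega)]
      have c1 : j - 1 ≤ k := by omega
      have c2 : j ≤ k := by omega
      have c3 : j ≤ k + 1 := by omega
      simp only [c1, c2, c3, if_pos]
      rw [show j = (j - 1) + 1 by omega, Nat.choose_succ_succ]
      push_cast; ring
    · rw [if_neg hj1]
      by_cases hle : j ≤ k + 1
      · have : j = 0 ∨ j = k + 1 := by omega
        rcases this with h | h <;> simp [h]
      · simp [hle]

theorem pv_rowFun_eq (N : Nat) :
    pvRowFun N N = (List.range (N + 1)).map (fun j => ((Nat.choose N j : Nat) : Int)) := by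
  apply List.ext_getElem (by simp [pvRowFun])
  intro k h1 h2
  simp [pvRowFun] at h1 ⊢
  omega

theorem pv_sum (N : Nat) : (pvRowFun N N).sum = ((2 ^ N : Nat) : Int) := by
  rw [pv_rowFun_eq, ← Nat.sum_range_choose N]
  push_cast
  rfl

theorem pv_max (N : Nat) :
    (PySem.List.max? (pvRowFun N N) (fun x => x)).getD 0
      = ((Nat.choose N (N / 2) : Nat) : Int) := by
  have hmem : ((Nat.choose N (N / 2) : Nat) : Int) ∈ pvRowFun N N := by
    rw [pv_rowFun_eq]
    exact List.mem_map_of_mem (by simp; omega)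
  obtain ⟨m, hm⟩ : ∃ m, PySem.List.max? (pvRowFun N N) (fun x => x) = some m := by
    cases h : PySem.List.max? (pvRowFun N N) (fun x => x) with
    | none => rw [PySem.List.max?_eq_none_iff] at h; rw [h] at hmem; simp at hmem
    | some m => exact ⟨m, rfl⟩
  rw [hm]
  have hub : ∀ y ∈ pvRowFun N N, y ≤ m := by
    intro y hy; exact PySem.List.max?_isMax hm y hy
  have hmm : m ∈ pvRowFun N N := PySem.List.max?_mem hm
  simp only [Option.getD_some]
  apply le_antisymm
  · rw [pv_rowFun_eq] at hmm
    obtain ⟨j, hj, rfl⟩ := List.mem_map.mp hmm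
    exact_mod_cast Nat.choose_le_middle j N
  · exact hub _ hmem

-- B's product loop computes the binomial coefficient exactly (the division is always exact)
theorem pv_choose (N M : Nat) (hM : M ≤ N) :
    (PySem.List.pyRange 1 ((M : Int) + 1) 1).foldl
        (fun c i => PySem.Int.floordiv (c * ((N : Int) - i + 1)) i) 1
      = ((Nat.choose N M : Nat) : Int) := by
  induction M with
  | zero =>
    rw [PySem.List.pyRange_one_eq_nil (by omega)]
    simp
  | succ k ih =>
    rw [show ((k + 1 : Nat) : Int) + 1 = ((k : Int) + 1) + 1 by push_cast; ring,
        PySem.List.pyRange_one_succ_right (by omega), List.foldl_append,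
        ih (by omega)]
    simp only [List.foldl]
    have hsub : (N : Int) - ((k : Int) + 1) + 1 = ((N - k : Nat) : Int) := by omega
    rw [hsub]
    have key : ((Nat.choose N k : Nat) : Int) * ((N - k : Nat) : Int)
        = ((Nat.choose N (k + 1) : Nat) : Int) * ((k : Int) + 1) := by
      have keyN : Nat.choose N k * (N - k) = Nat.choose N (k + 1) * (k + 1) :=
        (Nat.choose_succ_right_eq N k).symm
      exact_mod_cast keyN
    rw [key, PySem.Int.floordiv_eq_ediv_of_pos (by omega),
        Int.mul_ediv_cancel _ (by omega)]

-- ===== VERDICT (by name: the statement is the Claim_ definition above) =====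
theorem factorial_combinations_spec : Claim_equal_factorial_combinations := by
  intro n _ hP
  unfold Spec_factorial_combinations
  lift n to Nat using hP with N
  unfold factorial_combinations factorial_combinations_alt
  have hrep : PySem.List.pyRepeat ([1] : List Int) ((N : Int) + 1)
      = List.replicate (N + 1) 1 := by
    rw [PySem.List.pyRepeat_singleton]
    congr 1
  have hrow := pv_outer N N le_rfl
  have hlen : (pvRowFun N N).length = N + 1 := by simp [pvRowFun]
  have hslice : PySem.List.slice (pvRowFun N N) none (some ((N : Int) + 1))
      = pvRowFun N N := by
    rw [PySem.List.slice_to _ (by omega)]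
    rw [List.take_of_length_le (by omega)]
  have hm : PySem.Int.floordiv (N : Int) 2 = ((N / 2 : Nat) : Int) := by
    rw [PySem.Int.floordiv_eq_ediv_of_pos (by omega)]
    omega
  simp only [hrep, hrow, hslice, hm, pv_fact1, pv_fact2, pv_sum, pv_max,
    pv_choose N (N / 2) (Nat.div_le_self N 2), Int.toNat_natCast]
  norm_num
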